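-- pv_equiv track=rewrite | github.com/minu0508/Algorithm | Python/Programmers/Level_0/등수 매기기.py | solution
-- ===== SOURCE A (Python) =====
-- def solution(score):
--     answer = []
--     Plus = []
--     for i in score:
--         Plus.append(i[0] + i[1])
--
--     Plus_Sort = sorted(Plus, reverse=True)
--
--     for j in range(len(Plus_Sort)):
--         answer.append(Plus_Sort.index(Plus[j])+1)
--
--     return answer
-- ===== SOURCE B (Python) =====
-- def solution(score):
--     plus = [s[0] + s[1] for s in score]
--     return [1 + sum(1 for w in plus if w > v) for v in plus]
-- ===== Notes on version B (the rewrite author's own statement) =====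
-- stated objective: simpler
-- what changed: drops sorting and the first-index lookup entirely: a student's rank is computed directly as 1 + the count of strictly larger sums, which equals the first index in the descending-sorted list
import Mathlib
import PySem

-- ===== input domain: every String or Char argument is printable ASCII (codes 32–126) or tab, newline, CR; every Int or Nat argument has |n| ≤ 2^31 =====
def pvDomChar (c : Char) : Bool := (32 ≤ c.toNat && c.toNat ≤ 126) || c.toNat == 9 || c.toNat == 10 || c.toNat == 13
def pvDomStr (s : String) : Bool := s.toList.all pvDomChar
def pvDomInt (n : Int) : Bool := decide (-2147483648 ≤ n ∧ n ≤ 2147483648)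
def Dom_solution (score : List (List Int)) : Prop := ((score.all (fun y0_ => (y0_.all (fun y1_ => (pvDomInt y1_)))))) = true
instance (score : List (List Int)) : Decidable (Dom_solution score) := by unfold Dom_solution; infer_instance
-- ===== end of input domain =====

-- B computes each rank directly as 1 + the number of strictly larger sums, with no sort
-- and no positional lookup; simpler, same asymptotic cost.

-- ===== PORT A =====
def solution (score : List (List Int)) : List Int :=
  let Plus := score.foldl (fun acc i =>
      acc ++ [PySem.List.pyGetD i 0 0 + PySem.List.pyGetD i 1 0]) []
  let PlusSort := PySem.List.sorted Plus (fun x => x) true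
  (PySem.List.pyRange 0 (PySem.List.len PlusSort) 1).foldl
    (fun acc j =>
      acc ++ [(((PySem.List.index? PlusSort (PySem.List.pyGetD Plus j 0)).getD 0 : Nat) : Int) + 1]) []

-- ===== PORT B =====
def solution_alt (score : List (List Int)) : List Int :=
  let plus := score.map (fun s => PySem.List.pyGetD s 0 0 + PySem.List.pyGetD s 1 0)
  plus.map (fun v => 1 + (plus.countP (fun w => decide (v < w)) : Int))

-- ===== PRECONDITION & SPEC =====
-- Pre_ excludes rows of length < 2, on which Python A raises IndexError at i[0]+i[1].
def Pre_solution (score : List (List Int)) : Prop := ∀ r ∈ score, 2 ≤ r.length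
instance (score : List (List Int)) : Decidable (Pre_solution score) := by unfold Pre_solution; infer_instance
def pvWitness_solution : List (List Int) := [[1, 2], [3, 4], [0, 3]]
def Spec_solution (score : List (List Int)) (out : List Int) : Prop := out = solution_alt score
instance (score : List (List Int)) (out : List Int) : Decidable (Spec_solution score out) := by unfold Spec_solution; infer_instance

-- ===== CLAIM (what is proved, stated in full; the proofs are below) =====
def Claim_equal_solution : Prop := ∀ (score : List (List Int)), Dom_solution score → Pre_solution score → Spec_solution score (solution score)

-- ===== LEMMAS AND PROOFS =====

-- In a non-increasing list, the first index of a member v is the count of elements > v.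
theorem index_eq_countP (L : List Int) (v : Int)
    (hp : L.Pairwise (fun a b => b ≤ a)) (hm : v ∈ L) :
    ((PySem.List.index? L v).getD 0 : Nat) = L.countP (fun w => decide (v < w)) := by
  induction L with
  | nil => cases hm
  | cons x t ih =>
    have hx : ∀ w ∈ t, w ≤ x := (List.pairwise_cons.mp hp).1
    have hp' : t.Pairwise (fun a b => b ≤ a) := (List.pairwise_cons.mp hp).2
    by_cases hxv : x = v
    · subst hxv
      rw [PySem.List.index?_cons_self]
      have : (x :: t).countP (fun w => decide (x < w)) = 0 := by
        rw [List.countP_eq_zero]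
        intro w hw
        simp only [decide_eq_true_eq] at *
        rcases List.mem_cons.mp hw with h | h
        · omega
        · have := hx w h; omega
      simp [this]
    · have hm' : v ∈ t := by
        rcases List.mem_cons.mp hm with h | h
        · exact absurd h.symm hxv
        · exact h
      rw [PySem.List.index?_cons_of_ne _ hxv]
      obtain ⟨k, hk⟩ := Option.isSome_iff_exists.mp
        ((PySem.List.index?_isSome_iff t v).mpr hm')
      have hvx : v < x := lt_of_le_of_ne (hx v hm') (fun h => hxv h.symm)
      rw [List.countP_cons]
      simp only [hk, Option.map_some, Option.getD_some, decide_eq_true_eq]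
      have := ih hp' hm'
      rw [hk] at this
      simp only [Option.getD_some] at this
      simp [hvx, this]

-- ===== VERDICT (by name: the statement is the Claim_ definition above) =====
theorem solution_spec : Claim_equal_solution := by
  intro score _ _
  unfold Spec_solution solution solution_alt
  simp only []
  have hP : score.foldl (fun acc i =>
      acc ++ [PySem.List.pyGetD i 0 0 + PySem.List.pyGetD i 1 0]) ([] : List Int)
      = score.map (fun s => PySem.List.pyGetD s 0 0 + PySem.List.pyGetD s 1 0) := by
    rw [PySem.List.foldl_append_singleton_eq_map, List.nil_append]
  rw [hP]
  set plus := score.map (fun s => PySem.List.pyGetD s 0 0 + PySem.List.pyGetD s 1 0) with hplus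
  set srt := PySem.List.sorted plus (fun x => x) true with hsrt
  have hlen : PySem.List.len srt = PySem.List.len plus := by
    simp only [PySem.List.len, hsrt, PySem.List.length_sorted]
  rw [hlen,
    PySem.List.foldl_pyRange_zero_pyGetD plus 0
      (fun acc v => acc ++ [(((PySem.List.index? srt v).getD 0 : Nat) : Int) + 1]) [],
    PySem.List.foldl_append_singleton_eq_map, List.nil_append]
  apply List.map_congr_left
  intro v hv
  have hvs : v ∈ srt := (PySem.List.mem_sorted plus (fun x => x) true v).mpr hv
  have hpw : srt.Pairwise (fun a b => b ≤ a) := PySem.List.sorted_pairwise_rev plus (fun x => x)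
  rw [index_eq_countP srt v hpw hvs,
    (PySem.List.sorted_perm plus (fun x => x) true).countP_eq]
  ring
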